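-- pv_equiv track=rewrite | github.com/learn-ukrainian/learn-ukrainian.github.io | scripts/tools/fix_plan_latin_refs.py | _find_scalar_span
-- ===== SOURCE A (Python) =====
-- def _is_escaped_double_quote(text: str, index: int) -> bool:
--     backslashes = 0
--     current = index - 1
--     while current >= 0 and text[current] == "\\":
--         backslashes += 1
--         current -= 1
--     return backslashes % 2 == 1
--
-- def _find_closing_quote(text: str, quote: str) -> int:
--     index = 0
--     while index < len(text):
--         if text[index] != quote:
--             index += 1
--             continue
--         if quote == '"' and _is_escaped_double_quote(text, index):
--             index += 1
--             continue
--         if quote == "'" and index + 1 < len(text) and text[index + 1] == "'":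
--             index += 2
--             continue
--         return index
--     return -1
--
-- def _find_scalar_span(lines: list[str], line_no: int) -> tuple[int, int]:
--     line = lines[line_no]
--     stripped = line.lstrip()
--     if stripped.startswith("- "):
--         value_text = stripped[2:].lstrip()
--     elif ":" in stripped:
--         value_text = stripped.split(":", 1)[1].lstrip()
--     else:
--         return line_no, line_no
--
--     if not value_text or value_text[0] not in {"'", '"'}:
--         return line_no, line_no
--
--     quote = value_text[0]
--     if _find_closing_quote(value_text[1:], quote) != -1:
--         return line_no, line_no
--
--     for end_line in range(line_no + 1, len(lines)):
--         if _find_closing_quote(lines[end_line], quote) != -1: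
--             return line_no, end_line
--     return line_no, line_no
-- ===== SOURCE B (Python) =====
-- def _has_closing_quote(text: str, quote: str) -> bool:
--     if quote == '"':
--         escaped = False
--         for ch in text:
--             if escaped:
--                 escaped = False
--             elif ch == "\\":
--                 escaped = True
--             elif ch == '"':
--                 return True
--         return False
--     odd = False
--     for ch in text:
--         if ch == "'":
--             odd = not odd
--         elif odd:
--             return True
--     return odd
--
-- def _find_scalar_span(lines: list[str], line_no: int) -> tuple[int, int]:
--     line = lines[line_no]
--     stripped = line.lstrip()
--     if stripped.startswith("- "):
--         value_text = stripped[2:].lstrip()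
--     elif ":" in stripped:
--         value_text = stripped.split(":", 1)[1].lstrip()
--     else:
--         return line_no, line_no
--     if not value_text or value_text[0] not in "'\"":
--         return line_no, line_no
--     quote = value_text[0]
--     if _has_closing_quote(value_text[1:], quote):
--         return line_no, line_no
--     for end_line in range(line_no + 1, len(lines)):
--         if _has_closing_quote(lines[end_line], quote):
--             return line_no, end_line
--     return line_no, line_no
-- ===== Notes on version B (the rewrite author's own statement) =====
-- stated objective: alternative
-- what changed: The closing-quote search is a single forward pass that tracks backslash-escape parity (double quotes) or quote-run parity (single quotes) incrementally, instead of A's index loop that re-scans all preceding backslashes at every quote and looks ahead to jump over doubled quotes.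
import Mathlib
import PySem

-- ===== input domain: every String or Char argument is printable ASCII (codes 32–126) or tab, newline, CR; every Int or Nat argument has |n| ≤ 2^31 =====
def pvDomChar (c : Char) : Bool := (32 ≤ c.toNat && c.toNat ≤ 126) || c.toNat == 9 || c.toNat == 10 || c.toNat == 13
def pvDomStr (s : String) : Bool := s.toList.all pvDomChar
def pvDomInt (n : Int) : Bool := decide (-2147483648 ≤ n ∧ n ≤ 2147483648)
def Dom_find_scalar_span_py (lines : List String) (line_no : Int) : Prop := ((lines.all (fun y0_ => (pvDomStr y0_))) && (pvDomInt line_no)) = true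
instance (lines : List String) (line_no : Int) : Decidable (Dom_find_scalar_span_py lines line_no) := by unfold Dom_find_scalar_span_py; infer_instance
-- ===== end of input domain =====

-- B replaces A's closing-quote search (index loop with a backslash back-scan per quote and a
-- look-ahead jump over doubled quotes) with a single forward pass keeping escape/quote-run parity
-- incrementally; objective: alternative (one-pass scanner vs back-scan per quote).
-- A raises IndexError when line_no is not a valid Python index into lines; Pre_ excludes exactly that.

-- ===== PORT A =====
-- _is_escaped_double_quote: the while loop counts the consecutive backslashes immediately before `index`
def pvBsCount (text : List Char) : Nat → Nat
  | 0 => 0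
  | n+1 => if text.getD n ' ' = '\\' then pvBsCount text n + 1 else 0

def pvEscapedA (text : List Char) (index : Nat) : Bool := pvBsCount text index % 2 == 1

-- _find_closing_quote: the while loop over index (advances by 1 or 2)
def pvFcqA (text : List Char) (quote : Char) (index : Nat) : Int :=
  if index < text.length then
    if text.getD index ' ' ≠ quote then pvFcqA text quote (index+1)
    else if quote = '"' ∧ pvEscapedA text index = true then pvFcqA text quote (index+1)
    else if quote = '\'' ∧ index+1 < text.length ∧ text.getD (index+1) ' ' = '\'' then pvFcqA text quote (index+2)
    else (index : Int)
  else -1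
termination_by text.length - index

-- the tail of _find_scalar_span once value_text is known
def pvValueA (lines : List String) (line_no : Int) (value_text : List Char) : List Int :=
  match value_text with
  | [] => [line_no, line_no]
  | q :: rest =>
    if ¬ (q = '\'' ∨ q = '"') then [line_no, line_no]
    else if pvFcqA rest q 0 ≠ -1 then [line_no, line_no]
    else
      match (PySem.List.pyRange (line_no+1) (lines.length : Int) 1).find?
          (fun i => pvFcqA ((PySem.List.pyGet? lines i).getD "").toList q 0 != -1) with
      | some e => [line_no, e]
      | none => [line_no, line_no]

def find_scalar_span_py (lines : List String) (line_no : Int) : List Int :=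
  match PySem.List.pyGet? lines line_no with
  | none => []   -- Python raises IndexError here; excluded by Pre_
  | some line =>
    let stripped := PySem.Chars.lstrip line.toList
    if PySem.Chars.startswith stripped ['-', ' '] then
      pvValueA lines line_no (PySem.Chars.lstrip (stripped.drop 2))
    else if PySem.Chars.isIn [':'] stripped then
      pvValueA lines line_no (PySem.Chars.lstrip ((PySem.Chars.splitOnMax stripped [':'] 1).getD 1 []))
    else [line_no, line_no]

-- ===== PORT B =====
-- forward pass for quote = '"': `escaped` is the parity of the current backslash run
def pvScanD (escaped : Bool) : List Char → Bool
  | [] => false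
  | c :: rest =>
    if escaped then pvScanD false rest
    else if c = '\\' then pvScanD true rest
    else if c = '"' then true
    else pvScanD false rest

-- forward pass for quote = '\'': `odd` is the parity of the current run of quotes
def pvScanS (odd : Bool) : List Char → Bool
  | [] => odd
  | c :: rest =>
    if c = '\'' then pvScanS (!odd) rest
    else if odd then true
    else pvScanS odd rest

def pvHasClosing (quote : Char) (text : List Char) : Bool :=
  if quote = '"' then pvScanD false text else pvScanS false text

def pvValueB (lines : List String) (line_no : Int) (value_text : List Char) : List Int :=
  match value_text with
  | [] => [line_no, line_no]
  | q :: rest =>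
    if ¬ (q = '\'' ∨ q = '"') then [line_no, line_no]
    else if pvHasClosing q rest then [line_no, line_no]
    else
      match (PySem.List.pyRange (line_no+1) (lines.length : Int) 1).find?
          (fun i => pvHasClosing q ((PySem.List.pyGet? lines i).getD "").toList) with
      | some e => [line_no, e]
      | none => [line_no, line_no]

def find_scalar_span_py_alt (lines : List String) (line_no : Int) : List Int :=
  match PySem.List.pyGet? lines line_no with
  | none => []   -- Python raises IndexError here; excluded by Pre_
  | some line =>
    let stripped := PySem.Chars.lstrip line.toList
    if PySem.Chars.startswith stripped ['-', ' '] then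
      pvValueB lines line_no (PySem.Chars.lstrip (stripped.drop 2))
    else if PySem.Chars.isIn [':'] stripped then
      pvValueB lines line_no (PySem.Chars.lstrip ((PySem.Chars.splitOnMax stripped [':'] 1).getD 1 []))
    else [line_no, line_no]

-- ===== PRECONDITION & SPEC =====
-- A (and B) raise IndexError unless line_no is a valid Python index into lines.
def Pre_find_scalar_span_py (lines : List String) (line_no : Int) : Prop :=
  -(lines.length : Int) ≤ line_no ∧ line_no < (lines.length : Int)
instance (lines : List String) (line_no : Int) : Decidable (Pre_find_scalar_span_py lines line_no) := by
  unfold Pre_find_scalar_span_py; infer_instance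

def pvWitness_find_scalar_span_py : List String × Int := (["k: 'ab", "cd'"], 0)

def Spec_find_scalar_span_py (lines : List String) (line_no : Int) (out : List Int) : Prop := out = find_scalar_span_py_alt lines line_no
instance (lines : List String) (line_no : Int) (out : List Int) : Decidable (Spec_find_scalar_span_py lines line_no out) := by unfold Spec_find_scalar_span_py; infer_instance

-- ===== CLAIM (what is proved, stated in full; the proofs are below) =====
def Claim_equal_find_scalar_span_py : Prop := ∀ (lines : List String) (line_no : Int), Dom_find_scalar_span_py lines line_no → Pre_find_scalar_span_py lines line_no → Spec_find_scalar_span_py lines line_no (find_scalar_span_py lines line_no)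

-- ===== LEMMAS AND PROOFS =====

theorem pvGetD_eq_getElem (text : List Char) (i : Nat) (hi : i < text.length) :
    text.getD i ' ' = text[i] := by
  rw [List.getD_eq_getElem?_getD, List.getElem?_eq_getElem hi]; rfl

theorem pvScanD_nil (esc : Bool) : pvScanD esc [] = false := by cases esc <;> rfl

-- A's backslash back-scan parity at i+1, from the character at i
theorem pvEscapedA_succ (text : List Char) (i : Nat) (hi : i < text.length) :
    pvEscapedA text (i+1) = if text[i] = '\\' then !(pvEscapedA text i) else false := by
  unfold pvEscapedA
  have hstep : pvBsCount text (i+1)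
      = if text.getD i ' ' = '\\' then pvBsCount text i + 1 else 0 := rfl
  rw [hstep, pvGetD_eq_getElem text i hi]
  by_cases hb : text[i] = '\\'
  · simp only [if_pos hb]
    rcases Nat.mod_two_eq_zero_or_one (pvBsCount text i) with h | h <;>
      simp [Nat.add_mod, h]
  · simp [hb]

-- double-quote scanner ≡ A's search: the parity state equals A's backslash back-scan
theorem pvScanD_eq_fcq (text : List Char) : ∀ n i, text.length ≤ i + n →
    pvScanD (pvEscapedA text i) (text.drop i) = (pvFcqA text '"' i != -1) := by
  intro n
  induction n with
  | zero =>
    intro i h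
    have hge : text.length ≤ i := by omega
    rw [List.drop_eq_nil_of_le hge, pvScanD_nil, pvFcqA]
    simp [Nat.not_lt.mpr hge]
  | succ n ih =>
    intro i h
    by_cases hi : i < text.length
    · have hdrop : text.drop i = text[i] :: text.drop (i+1) := List.drop_eq_getElem_cons hi
      have hget := pvGetD_eq_getElem text i hi
      have hesc1 := pvEscapedA_succ text i hi
      have hihn : pvScanD (pvEscapedA text (i+1)) (text.drop (i+1))
          = (pvFcqA text '"' (i+1) != -1) := ih (i+1) (by omega)
      rw [hdrop, pvFcqA]
      simp only [if_pos hi, hget]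
      by_cases hc : text[i] = '"'
      · simp only [hc] at hesc1 ⊢
        cases hesc : pvEscapedA text i with
        | true =>
          have h1 : pvEscapedA text (i+1) = false := by rw [hesc1]; simp
          rw [h1] at hihn
          simp [pvScanD, hihn]
        | false =>
          simp [pvScanD]
      · have hq : text[i] ≠ '"' := hc
        simp only [if_pos hq]
        rw [← hihn]
        by_cases hb : text[i] = '\\'
        · simp only [hb] at hesc1 ⊢
          have h1 : pvEscapedA text (i+1) = !(pvEscapedA text i) := by rw [hesc1]; simp
          cases hesc : pvEscapedA text i <;>
            simp [pvScanD, h1, hesc]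
        · have h1 : pvEscapedA text (i+1) = false := by rw [hesc1]; simp [hb]
          cases hesc : pvEscapedA text i <;>
            simp [pvScanD, h1, hb, hc]
    · have hge : text.length ≤ i := by omega
      rw [List.drop_eq_nil_of_le hge, pvScanD_nil, pvFcqA]
      simp [Nat.not_lt.mpr hge]

-- single-quote scanner ≡ A's search: run parity replaces A's look-ahead jump by two
theorem pvScanS_eq_fcq (text : List Char) : ∀ n i, text.length ≤ i + n →
    pvScanS false (text.drop i) = (pvFcqA text '\'' i != -1) := by
  intro n
  induction n using Nat.strong_induction_on with
  | _ n ih =>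
    intro i h
    by_cases hi : i < text.length
    · have hn1 : 1 ≤ n := by omega
      have hdrop : text.drop i = text[i] :: text.drop (i+1) := List.drop_eq_getElem_cons hi
      have hget := pvGetD_eq_getElem text i hi
      rw [hdrop, pvFcqA]
      simp only [if_pos hi, hget]
      by_cases hc : text[i] = '\''
      · simp only [hc]
        simp only [pvScanS]
        by_cases h2 : i + 1 < text.length
        · have hdrop2 : text.drop (i+1) = text[i+1] :: text.drop (i+2) :=
            List.drop_eq_getElem_cons h2
          have hget2 := pvGetD_eq_getElem text (i+1) h2
          rw [hdrop2]
          by_cases hc2 : text[i+1] = '\''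
          · have hihn : pvScanS false (text.drop (i+2)) = (pvFcqA text '\'' (i+2) != -1) :=
              ih (n-1) (by omega) (i+2) (by omega)
            simp only [hc2, pvScanS]
            simp [h2, hc2, hihn]
          · simp only [pvScanS, if_neg hc2]
            simp [hc2, h2]
        · rw [List.drop_eq_nil_of_le (by omega : text.length ≤ i + 1)]
          simp only [pvScanS]
          simp [h2]
      · simp only [if_pos hc]
        have hihn : pvScanS false (text.drop (i+1)) = (pvFcqA text '\'' (i+1) != -1) :=
          ih (n-1) (by omega) (i+1) (by omega)
        simp only [pvScanS, if_neg hc, if_neg (by simp : ¬ (false = true))]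
        exact hihn
    · have hge : text.length ≤ i := by omega
      rw [List.drop_eq_nil_of_le hge, pvFcqA]
      simp only [pvScanS]
      simp [Nat.not_lt.mpr hge]

theorem pvHasClosing_eq (q : Char) (hq : q = '\'' ∨ q = '"') (cs : List Char) :
    pvHasClosing q cs = (pvFcqA cs q 0 != -1) := by
  rcases hq with hq | hq <;> subst hq
  · have := pvScanS_eq_fcq cs cs.length 0 (by omega)
    simpa [pvHasClosing] using this
  · have := pvScanD_eq_fcq cs cs.length 0 (by omega)
    have h0 : pvEscapedA cs 0 = false := rfl
    rw [h0] at this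
    simpa [pvHasClosing] using this

theorem pvValue_eq (lines : List String) (line_no : Int) (vt : List Char) :
    pvValueA lines line_no vt = pvValueB lines line_no vt := by
  cases vt with
  | nil => rfl
  | cons q rest =>
    by_cases hq : q = '\'' ∨ q = '"'
    · have hfun : (fun i => pvFcqA ((PySem.List.pyGet? lines i).getD "").toList q 0 != -1)
          = (fun i => pvHasClosing q ((PySem.List.pyGet? lines i).getD "").toList) := by
        funext i
        rw [pvHasClosing_eq q hq]
      have hhd : pvHasClosing q rest = (pvFcqA rest q 0 != -1) := pvHasClosing_eq q hq rest
      simp only [pvValueA, pvValueB, if_neg (not_not.mpr hq), hfun, hhd]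
      by_cases hf : pvFcqA rest q 0 = -1
      · simp [hf]
      · simp [hf]
    · simp [pvValueA, pvValueB, hq]

-- ===== VERDICT (by name: the statement is the Claim_ definition above) =====
theorem find_scalar_span_py_spec : Claim_equal_find_scalar_span_py := by
  intro lines line_no _ _
  unfold Spec_find_scalar_span_py find_scalar_span_py find_scalar_span_py_alt
  cases PySem.List.pyGet? lines line_no with
  | none => rfl
  | some line => simp only [pvValue_eq]
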